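-- pv_equiv track=rewrite | github.com/intv0id/RIAI | analyzer_clement.py | balanced_split
-- ===== SOURCE A (Python) =====
-- def balanced_split(text):
--     i = 0
--     bal = 0
--     start = 0
--     result = []
--     while i < len(text):
--         if text[i] == '[':
--             bal += 1
--         elif text[i] == ']':
--             bal -= 1
--         elif text[i] == ',' and bal == 0:
--             result.append(text[start:i])
--             start = i+1
--         i += 1
--     if start < i:
--         result.append(text[start:i])
--     return result
-- ===== SOURCE B (Python) =====
-- def balanced_split(text):
--     result = []
--     cur = []
--     bal = 0
--     for ch in text:
--         if ch == '[':
--             bal += 1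
--             cur.append(ch)
--         elif ch == ']':
--             bal -= 1
--             cur.append(ch)
--         elif ch == ',' and bal == 0:
--             result.append(''.join(cur))
--             cur = []
--         else:
--             cur.append(ch)
--     if cur:
--         result.append(''.join(cur))
--     return result
-- ===== Notes on version B (the rewrite author's own statement) =====
-- stated objective: alternative
-- what changed: B replaces A's index/slice machinery (while loop with i, start and text[start:i] slices) by a single for-each pass that builds each segment character by character in an accumulator and flushes it on top-level commas, with a nonempty-tail flush at the end.
import Mathlib
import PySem

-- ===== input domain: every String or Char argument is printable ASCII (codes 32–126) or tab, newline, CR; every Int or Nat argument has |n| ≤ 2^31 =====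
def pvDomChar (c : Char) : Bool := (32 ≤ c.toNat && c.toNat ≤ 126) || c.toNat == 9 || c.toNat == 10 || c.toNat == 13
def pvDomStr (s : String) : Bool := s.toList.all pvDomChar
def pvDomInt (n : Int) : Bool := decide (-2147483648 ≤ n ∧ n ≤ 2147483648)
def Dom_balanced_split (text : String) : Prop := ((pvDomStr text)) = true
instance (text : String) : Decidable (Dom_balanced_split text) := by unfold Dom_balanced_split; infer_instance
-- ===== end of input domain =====

-- B builds segments character by character with an accumulator instead of A's index/slice bookkeeping; same cost, different decomposition.

-- ===== PORT A =====
-- A's while loop: i scans, start marks the segment start, text[start:i] sliced out on top-level commas.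
def pvALoop (cs : List Char) (i : Nat) (bal : Int) (start : Nat) (result : List (List Char)) :
    List (List Char) × Nat :=
  if h : i < cs.length then
    if cs[i] = '[' then pvALoop cs (i + 1) (bal + 1) start result
    else if cs[i] = ']' then pvALoop cs (i + 1) (bal - 1) start result
    else if cs[i] = ',' ∧ bal = 0 then
      pvALoop cs (i + 1) bal (i + 1) (result ++ [PySem.List.slice cs (some (start : Int)) (some (i : Int))])
    else pvALoop cs (i + 1) bal start result
  else (result, start)
termination_by cs.length - i

def balanced_split (text : String) : List String :=
  let cs := text.toList
  let p := pvALoop cs 0 0 0 []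
  (if p.2 < cs.length then p.1 ++ [PySem.List.slice cs (some (p.2 : Int)) (some (cs.length : Int))] else p.1).map
    String.ofList

-- ===== PORT B =====
-- state = (bal, cur, result)
def pvBStep (s : Int × List Char × List (List Char)) (c : Char) : Int × List Char × List (List Char) :=
  if c = '[' then (s.1 + 1, s.2.1 ++ [c], s.2.2)
  else if c = ']' then (s.1 - 1, s.2.1 ++ [c], s.2.2)
  else if c = ',' ∧ s.1 = 0 then (s.1, [], s.2.2 ++ [s.2.1])
  else (s.1, s.2.1 ++ [c], s.2.2)

def balanced_split_alt (text : String) : List String :=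
  let s := text.toList.foldl pvBStep (0, [], [])
  (if s.2.1 ≠ [] then s.2.2 ++ [s.2.1] else s.2.2).map String.ofList

-- ===== PRECONDITION & SPEC =====
def Spec_balanced_split (text : String) (out : List String) : Prop := out = balanced_split_alt text
instance (text : String) (out : List String) : Decidable (Spec_balanced_split text out) := by unfold Spec_balanced_split; infer_instance

-- ===== CLAIM (what is proved, stated in full; the proofs are below) =====
def Claim_equal_balanced_split : Prop := ∀ (text : String), Dom_balanced_split text → Spec_balanced_split text (balanced_split text)

-- ===== LEMMAS AND PROOFS =====

-- growing the slice by one character = appending that character to the accumulated segment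
lemma pvTakeSucc (cs : List Char) (start i : Nat) (h1 : start ≤ i) (h : i < cs.length) :
    (cs.drop start).take (i + 1 - start) = (cs.drop start).take (i - start) ++ [cs[i]] := by
  have he : i + 1 - start = (i - start) + 1 := by omega
  rw [he, List.take_succ]
  have hg : (cs.drop start)[i - start]? = some cs[i] := by
    rw [List.getElem?_drop]
    have : start + (i - start) = i := by omega
    rw [this]
    exact List.getElem?_eq_getElem h
  simp [hg]

-- main invariant: B's fold over the unread suffix lands on A's final (result, start), with cur = the pending slice
lemma pvMain (cs : List Char) (i start : Nat) (bal : Int) (res : List (List Char))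
    (h1 : start ≤ i) (h2 : i ≤ cs.length) :
    ∃ b', (cs.drop i).foldl pvBStep (bal, (cs.drop start).take (i - start), res)
        = (b', cs.drop (pvALoop cs i bal start res).2, (pvALoop cs i bal start res).1) := by
  by_cases h : i < cs.length
  · rw [List.drop_eq_getElem_cons h, List.foldl_cons]
    rw [pvALoop, dif_pos h]
    by_cases hb1 : cs[i] = '['
    · rw [if_pos hb1]
      have := pvMain cs (i + 1) start (bal + 1) res (by omega) (by omega)
      simpa [pvBStep, hb1, pvTakeSucc cs start i h1 h] using this
    · rw [if_neg hb1]
      by_cases hb2 : cs[i] = ']'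
      · rw [if_pos hb2]
        have := pvMain cs (i + 1) start (bal - 1) res (by omega) (by omega)
        have hne : cs[i] ≠ '[' := hb1
        simpa [pvBStep, hb2, hne, pvTakeSucc cs start i h1 h] using this
      · rw [if_neg hb2]
        by_cases hb3 : cs[i] = ',' ∧ bal = 0
        · rw [if_pos hb3]
          have := pvMain cs (i + 1) (i + 1) bal
            (res ++ [PySem.List.slice cs (some (start : Int)) (some (i : Int))]) (by omega) (by omega)
          simpa [pvBStep, hb1, hb2, hb3.1, hb3.2, PySem.List.slice_natCast, Nat.sub_self] using this
        · rw [if_neg hb3]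
          have := pvMain cs (i + 1) start bal res (by omega) (by omega)
          simpa [pvBStep, hb1, hb2, hb3, pvTakeSucc cs start i h1 h] using this
  · have hi : i = cs.length := by omega
    rw [pvALoop, dif_neg h]
    refine ⟨bal, ?_⟩
    subst hi
    simp only [List.drop_length, List.foldl_nil]
    have : (cs.drop start).take (cs.length - start) = cs.drop start := by
      apply List.take_of_length_le
      simp
    rw [this]
termination_by cs.length - i

-- the pending tail: cur nonempty ↔ start < len, and the tail slice is cur
lemma pvDropNe (cs : List Char) (s : Nat) : cs.drop s ≠ [] ↔ s < cs.length := by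
  rw [ne_eq, List.drop_eq_nil_iff]; omega

-- ===== VERDICT (by name: the statement is the Claim_ definition above) =====
theorem balanced_split_spec : Claim_equal_balanced_split := by
  intro text _
  unfold Spec_balanced_split balanced_split balanced_split_alt
  obtain ⟨b', hb⟩ := pvMain text.toList 0 0 0 [] (le_refl 0) (Nat.zero_le _)
  simp only [List.drop_zero, List.take_zero, Nat.sub_zero] at hb
  rw [hb]
  simp only
  by_cases hlt : (pvALoop text.toList 0 0 0 []).2 < text.toList.length
  · rw [if_pos hlt, if_pos ((pvDropNe _ _).mpr hlt)]
    have : PySem.List.slice text.toList (some ((pvALoop text.toList 0 0 0 []).2 : Int))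
        (some (text.toList.length : Int))
        = text.toList.drop (pvALoop text.toList 0 0 0 []).2 := by
      rw [PySem.List.slice_natCast]
      apply List.take_of_length_le
      simp
    rw [this]
  · rw [if_neg hlt, if_neg (by simpa using (pvDropNe _ _).not.mpr hlt)]
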